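-- pv_equiv track=rewrite | github.com/caceders/KeypointExtractionBenchmark | display_mma.py | _linestyles_for
-- ===== SOURCE A (Python) =====
-- _LINESTYLES = ["-", "--", "-.", ":"]
--
-- def _linestyles_for(all_vals, cols):
--     """Vary linestyle by secondary column within each primary group."""
--     if len(cols) <= 1:
--         return {v: "-" for v in all_vals}
--     from collections import defaultdict
--     groups = defaultdict(list)
--     for v in all_vals:
--         groups[v[0]].append(v)
--     result = {}
--     for group in groups.values():
--         for i, lv in enumerate(group):
--             result[lv] = _LINESTYLES[i % len(_LINESTYLES)]
--     return result
-- ===== SOURCE B (Python) =====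
-- _LINESTYLES = ["-", "--", "-.", ":"]
--
-- def _linestyles_for(all_vals, cols):
--     """Vary linestyle by secondary column within each primary group."""
--     if len(cols) <= 1:
--         return {v: "-" for v in all_vals}
--     keys = dict.fromkeys(v[0] for v in all_vals)
--     result = {}
--     for k in keys:
--         i = 0
--         for v in all_vals:
--             if v[0] == k:
--                 result[v] = _LINESTYLES[i % len(_LINESTYLES)]
--                 i += 1
--     return result
-- ===== Notes on version B (the rewrite author's own statement) =====
-- stated objective: alternative
-- what changed: B drops A's defaultdict group-lists entirely: it dedups the primary keys once, then for each key rescans all_vals with a running style counter, assigning linestyles directly into the result dict.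
import Mathlib
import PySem

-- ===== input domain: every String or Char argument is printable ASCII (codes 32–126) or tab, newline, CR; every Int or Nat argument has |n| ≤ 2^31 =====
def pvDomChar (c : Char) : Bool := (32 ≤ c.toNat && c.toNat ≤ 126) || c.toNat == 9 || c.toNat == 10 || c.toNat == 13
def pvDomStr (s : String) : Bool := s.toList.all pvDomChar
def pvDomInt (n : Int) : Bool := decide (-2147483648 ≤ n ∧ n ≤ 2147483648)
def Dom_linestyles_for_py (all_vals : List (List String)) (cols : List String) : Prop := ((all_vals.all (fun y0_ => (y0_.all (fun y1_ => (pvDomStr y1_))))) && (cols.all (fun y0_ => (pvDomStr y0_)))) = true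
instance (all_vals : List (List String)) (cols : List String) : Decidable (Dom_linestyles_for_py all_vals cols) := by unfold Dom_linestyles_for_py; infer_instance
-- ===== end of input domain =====

-- B drops A's defaultdict group-lists: it dedups the primary keys once, then for each key
-- rescans all_vals with a running counter; same return value (and dict order), objective: alternative.

-- _LINESTYLES
def pvLS : List String := ["-", "--", "-.", ":"]

-- v[0] (Pre_ guarantees v ≠ [] when this line runs, so pyGet? is some; getD "" is never taken)
def pvHead (v : List String) : String := (PySem.List.pyGet? v 0).getD ""

-- _LINESTYLES[i % len(_LINESTYLES)] (for 0 ≤ i the index is in range, getD "-" is never taken)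
def pvStyle (i : Int) : String := (PySem.List.pyGet? pvLS (PySem.Int.mod i (Int.ofNat pvLS.length))).getD "-"

-- ===== PORT A =====
def linestyles_for_py (all_vals : List (List String)) (cols : List String) : List (List String × String) :=
  if cols.length ≤ 1 then
    -- {v: "-" for v in all_vals}
    (all_vals.foldl (fun d v => d.insert v "-") (PySem.Dict.empty : PySem.Dict (List String) String)).items
  else
    -- groups = defaultdict(list); for v in all_vals: groups[v[0]].append(v)
    let groups : PySem.Dict String (List (List String)) :=
      all_vals.foldl (fun g v => g.modify (pvHead v) [] (· ++ [v])) PySem.Dict.empty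
    -- result = {}; for group in groups.values(): for i, lv in enumerate(group): result[lv] = _LINESTYLES[i % len(_LINESTYLES)]
    let result : PySem.Dict (List String) String :=
      groups.values.foldl (fun r group =>
        (PySem.List.enumerate group).foldl (fun r p => r.insert p.2 (pvStyle p.1)) r)
        PySem.Dict.empty
    result.items

-- ===== PORT B =====
def linestyles_for_py_alt (all_vals : List (List String)) (cols : List String) : List (List String × String) :=
  if cols.length ≤ 1 then
    -- {v: "-" for v in all_vals}
    (all_vals.foldl (fun d v => d.insert v "-") (PySem.Dict.empty : PySem.Dict (List String) String)).items
  else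
    -- keys = dict.fromkeys(v[0] for v in all_vals)
    let keys : List String := PySem.List.dedup (all_vals.map pvHead)
    -- result = {}; for k in keys: i = 0; for v in all_vals: if v[0] == k: result[v] = _LINESTYLES[i % 4]; i += 1
    let result : PySem.Dict (List String) String :=
      keys.foldl (fun r k =>
        (all_vals.foldl
          (fun (p : PySem.Dict (List String) String × Int) v =>
            if pvHead v == k then (p.1.insert v (pvStyle p.2), p.2 + 1) else p)
          (r, 0)).1)
        PySem.Dict.empty
    result.items

-- ===== PRECONDITION & SPEC =====
-- Pre_ excludes exactly the inputs where the Python raises: when len(cols) > 1 both A and B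
-- read v[0] for every v in all_vals, an IndexError on an empty v.
def Pre_linestyles_for_py (all_vals : List (List String)) (cols : List String) : Prop :=
  1 < cols.length → ∀ v ∈ all_vals, v ≠ []
instance (all_vals : List (List String)) (cols : List String) : Decidable (Pre_linestyles_for_py all_vals cols) := by unfold Pre_linestyles_for_py; infer_instance

def pvWitness_linestyles_for_py : List (List String) × List String :=
  ([["a", "x"], ["a", "y"], ["b", "x"], ["a", "x"]], ["p", "s"])

def Spec_linestyles_for_py (all_vals : List (List String)) (cols : List String) (out : List (List String × String)) : Prop := out = linestyles_for_py_alt all_vals cols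
instance (all_vals : List (List String)) (cols : List String) (out : List (List String × String)) : Decidable (Spec_linestyles_for_py all_vals cols out) := by unfold Spec_linestyles_for_py; infer_instance

-- ===== CLAIM (what is proved, stated in full; the proofs are below) =====
def Claim_equal_linestyles_for_py : Prop := ∀ (all_vals : List (List String)) (cols : List String), Dom_linestyles_for_py all_vals cols → Pre_linestyles_for_py all_vals cols → Spec_linestyles_for_py all_vals cols (linestyles_for_py all_vals cols)

-- ===== LEMMAS AND PROOFS =====

-- a dict with Nodup keys is the map of (k, getD k d0) over its keys
theorem pv_items_eq_map_keys {κ ν : Type} [BEq κ] [LawfulBEq κ]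
    (d : PySem.Dict κ ν) (h : d.keys.Nodup) (d0 : ν) :
    d.items = d.keys.map (fun k => (k, d.getD k d0)) := by
  simp only [PySem.Dict.keys, List.map_map]
  conv_lhs => rw [← List.map_id d.items]
  refine List.map_congr_left ?_
  intro p hp
  have h2 : d.getD p.1 d0 = p.2 :=
    PySem.Dict.getD_of_mem_items d (k := p.1) (v := p.2) (by simpa using hp) h d0
  simp [Function.comp, h2]

-- B's inner counter loop is A's enumerate-over-the-filtered-group loop
theorem pv_inner_loop (all_vals : List (List String)) (k : String)
    (r : PySem.Dict (List String) String) (i : Int) :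
    (all_vals.foldl
      (fun (p : PySem.Dict (List String) String × Int) v =>
        if pvHead v == k then (p.1.insert v (pvStyle p.2), p.2 + 1) else p)
      (r, i)).1
    = (PySem.List.enumerate (all_vals.filter (fun v => pvHead v == k)) i).foldl
        (fun r p => r.insert p.2 (pvStyle p.1)) r := by
  induction all_vals generalizing r i with
  | nil => simp
  | cons v t ih =>
    by_cases h : (pvHead v == k) = true
    · have hf : List.filter (fun v => pvHead v == k) (v :: t)
          = v :: List.filter (fun v => pvHead v == k) t := by simp [h]
      simp only [List.foldl_cons, hf, PySem.List.enumerate_cons]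
      rw [if_pos h]
      exact ih _ _
    · have hf : List.filter (fun v => pvHead v == k) (v :: t)
          = List.filter (fun v => pvHead v == k) t := by simp [h]
      simp only [List.foldl_cons, hf]
      rw [if_neg h]
      exact ih _ _

-- ===== VERDICT (by name: the statement is the Claim_ definition above) =====
theorem linestyles_for_py_spec : Claim_equal_linestyles_for_py := by
  intro all_vals cols _ _
  unfold Spec_linestyles_for_py linestyles_for_py linestyles_for_py_alt
  by_cases hc : cols.length ≤ 1
  · simp [hc]
  · simp only [hc, if_false]
    -- view A's grouping fold as a fold over the (key, value) pairs
    rw [show (all_vals.foldl (fun g v => g.modify (pvHead v) [] (· ++ [v]))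
          (PySem.Dict.empty : PySem.Dict String (List (List String))))
        = (all_vals.map (fun v => (pvHead v, v))).foldl
            (fun d p => d.modify p.1 [] (· ++ [p.2])) PySem.Dict.empty from
      (List.foldl_map (f := fun v => (pvHead v, v)) (g := fun (d : PySem.Dict String (List (List String))) p => d.modify p.1 [] (· ++ [p.2])) (l := all_vals) (init := PySem.Dict.empty)).symm]
    set G := (all_vals.map (fun v => (pvHead v, v))).foldl
        (fun d p => d.modify p.1 [] (· ++ [p.2]))
        (PySem.Dict.empty : PySem.Dict String (List (List String))) with hG
    have hkeys : G.keys = PySem.List.dedup (all_vals.map pvHead) := by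
      rw [hG, PySem.Dict.keys_foldl_modify_key (all_vals.map (fun v => (pvHead v, v)))
        (fun p => p.1) ([] : List (List String)) (fun _ p xs => xs ++ [p.2]) PySem.Dict.empty]
      simp [PySem.Set.update, PySem.Set.ofList_eq_foldl, List.map_map, Function.comp_def,
        PySem.Dict.keys_empty]
    have hnodup : G.keys.Nodup := by
      rw [hkeys]; exact PySem.List.nodup_dedup _
    have hgetD : ∀ c, G.getD c [] = all_vals.filter (fun v => pvHead v == c) := by
      intro c
      rw [hG, PySem.Dict.getD_foldl_modify_append]
      simp [PySem.Dict.getD_empty, List.filter_map, Function.comp_def, List.map_map]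
    have hvalues : G.values
        = (PySem.List.dedup (all_vals.map pvHead)).map
            (fun c => all_vals.filter (fun v => pvHead v == c)) := by
      show G.items.map (·.2) = _
      rw [pv_items_eq_map_keys G hnodup [], hkeys, List.map_map]
      refine List.map_congr_left ?_
      intro c _
      simp [hgetD c]
    rw [hvalues, List.foldl_map]
    refine congrArg PySem.Dict.items (PySem.List.foldl_congr_mem _ _ _ _ ?_)
    intro r c _
    exact (pv_inner_loop all_vals c r 0).symm
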